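-- pv_equiv track=rewrite | github.com/PsyholiricPavel/VKR2023 | app/analize.py | divide_almost_equally
-- ===== SOURCE A (Python) =====
-- import heapq
--
-- def divide_almost_equally(arr, num_chunks):
--     arr.sort(key=lambda x: x['Duration'],reverse=True)
--     heap = [(0, idx) for idx in range(num_chunks)]
--     heapq.heapify(heap)
--     sets = {}
--     for i in range(num_chunks):
--         sets[i] = []
--     arr_idx = 0
--     while arr_idx < len(arr):
--         set_sum, set_idx = heapq.heappop(heap)
--         sets[set_idx].append(arr[arr_idx])
--         set_sum += arr[arr_idx]['Duration']
--         heapq.heappush(heap, (set_sum, set_idx))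
--         arr_idx += 1
--     return sets.values()
-- ===== SOURCE B (Python) =====
-- def divide_almost_equally(arr, num_chunks):
--     # Same greedy balanced partition, but no heap: keep a running-sum table and
--     # pick the least-loaded chunk by a linear scan (min over indices, first tie wins,
--     # which is exactly the heap's (sum, idx) tie-breaking). Sorts arr in place like A;
--     # returns a list of chunks (A returns a dict_values view of the same lists).
--     arr.sort(key=lambda x: x['Duration'], reverse=True)
--     chunks = [[] for _ in range(num_chunks)]
--     sums = [0 for _ in range(num_chunks)]
--     for item in arr:
--         j = min(range(num_chunks), key=lambda k: sums[k])
--         chunks[j].append(item)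
--         sums[j] += item['Duration']
--     return chunks
-- ===== Notes on version B (the rewrite author's own statement) =====
-- stated objective: simpler
-- what changed: Replaces the heapq priority queue (heapify/heappop/heappush of (sum, idx) tuples) by a plain running-sum list scanned linearly with min(range(n), key=...) for the least-loaded chunk, which reproduces the heap's sum-then-index tie-breaking; the sets dict becomes a plain list of chunk lists.
-- outside the precondition, e.g. on divide_almost_equally([{'Duration': 1}], 0): A raises IndexError, B raises ValueError; on divide_almost_equally([{'X': 1}], 1): A raises KeyError, B raises KeyError
import Mathlib
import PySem

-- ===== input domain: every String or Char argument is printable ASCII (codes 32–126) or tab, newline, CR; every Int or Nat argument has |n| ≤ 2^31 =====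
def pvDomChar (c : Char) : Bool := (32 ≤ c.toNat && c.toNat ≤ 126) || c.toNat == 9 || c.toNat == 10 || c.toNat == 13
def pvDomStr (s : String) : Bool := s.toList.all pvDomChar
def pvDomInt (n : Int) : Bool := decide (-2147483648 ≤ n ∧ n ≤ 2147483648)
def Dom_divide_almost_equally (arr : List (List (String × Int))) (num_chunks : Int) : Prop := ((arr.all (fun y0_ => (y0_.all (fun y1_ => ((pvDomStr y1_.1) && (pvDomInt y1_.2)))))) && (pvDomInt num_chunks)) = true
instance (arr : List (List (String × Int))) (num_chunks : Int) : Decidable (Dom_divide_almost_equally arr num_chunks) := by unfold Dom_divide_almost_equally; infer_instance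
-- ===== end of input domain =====

-- B replaces A's heapq priority queue by a running-sum table scanned linearly for the
-- least-loaded chunk (first tie wins, exactly the heap's (sum, idx) order); same greedy
-- result. Both A and B sort arr in place; A returns a dict_values view, B the same
-- chunk lists as a plain list — the equivalence proved is about the returned sequence of chunks.

-- x['Duration'] : first-match lookup in the item's dict (default never reached inside Pre_)
def pvDur (x : List (String × Int)) : Int := (PySem.Dict.mk x).getD "Duration" 0

-- ===== PORT A =====
-- tuple comparison (s, i) <= (t, j) used by heapq's ordering
def pvPairLe (a b : Int × Int) : Bool := decide (a.1 < b.1) || (decide (a.1 = b.1) && decide (a.2 ≤ b.2))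

-- heapq.heappop: remove and return the minimum tuple (none = IndexError on empty heap)
def pvPopMin : List (Int × Int) → Option ((Int × Int) × List (Int × Int))
  | [] => none
  | x :: xs =>
    match pvPopMin xs with
    | none => some (x, [])
    | some (m, rest) => if pvPairLe x m then some (x, xs) else some (m, x :: rest)

-- the while-loop of A: pop the least-loaded set, append the item, push the updated sum
def pvLoopA : List (List (String × Int)) → List (Int × Int) →
    PySem.Dict Int (List (List (String × Int))) → PySem.Dict Int (List (List (String × Int)))
  | [], _, sets => sets
  | x :: rest, heap, sets =>
    match pvPopMin heap with
    | none => sets  -- IndexError in Python; excluded by Pre_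
    | some ((s, j), heap') =>
        pvLoopA rest (heap' ++ [(s + pvDur x, j)]) (sets.modify j [] (fun L => L ++ [x]))

def divide_almost_equally (arr : List (List (String × Int))) (num_chunks : Int) : List (List (List (String × Int))) :=
  let arrS := PySem.List.sorted arr (fun x => pvDur x) true
  let heap := (PySem.List.pyRange 0 num_chunks 1).map (fun idx => ((0 : Int), idx))
  let sets := (PySem.List.pyRange 0 num_chunks 1).foldl (fun d i => d.insert i []) PySem.Dict.empty
  (pvLoopA arrS heap sets).values

-- ===== PORT B =====
-- the for-loop of B: scan the sums table for the least-loaded chunk, append there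
def pvLoopB (num_chunks : Int) : List (List (String × Int)) → List Int →
    List (List (List (String × Int))) → List (List (List (String × Int)))
  | [], _, chunks => chunks
  | x :: rest, sums, chunks =>
    match PySem.List.min? (PySem.List.pyRange 0 num_chunks 1) (fun k => PySem.List.pyGetD sums k 0) with
    | none => chunks  -- ValueError in Python (min of empty range); excluded by Pre_
    | some j =>
        pvLoopB num_chunks rest
          (sums.set j.toNat (PySem.List.pyGetD sums j 0 + pvDur x))
          (chunks.set j.toNat (PySem.List.pyGetD chunks j [] ++ [x]))

def divide_almost_equally_alt (arr : List (List (String × Int))) (num_chunks : Int) : List (List (List (String × Int))) :=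
  let arrS := PySem.List.sorted arr (fun x => pvDur x) true
  let chunks := (PySem.List.pyRange 0 num_chunks 1).map (fun _ => ([] : List (List (String × Int))))
  let sums := (PySem.List.pyRange 0 num_chunks 1).map (fun _ => (0 : Int))
  pvLoopB num_chunks arrS sums chunks

-- ===== PRECONDITION & SPEC =====
-- Pre_ excludes exactly the crashes: an item without a 'Duration' key (KeyError in A's
-- sort key) and a non-empty arr with num_chunks < 1 (IndexError in A, ValueError in B).
def Pre_divide_almost_equally (arr : List (List (String × Int))) (num_chunks : Int) : Prop :=
  (∀ x ∈ arr, "Duration" ∈ x.map Prod.fst) ∧ (arr = [] ∨ 1 ≤ num_chunks)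
instance (arr : List (List (String × Int))) (num_chunks : Int) : Decidable (Pre_divide_almost_equally arr num_chunks) := by unfold Pre_divide_almost_equally; infer_instance

def pvWitness_divide_almost_equally : (List (List (String × Int))) × Int :=
  ([[("Duration", 3)], [("Duration", 1)], [("Duration", 2)]], 2)

def Spec_divide_almost_equally (arr : List (List (String × Int))) (num_chunks : Int) (out : List (List (List (String × Int)))) : Prop := out = divide_almost_equally_alt arr num_chunks
instance (arr : List (List (String × Int))) (num_chunks : Int) (out : List (List (List (String × Int)))) : Decidable (Spec_divide_almost_equally arr num_chunks out) := by unfold Spec_divide_almost_equally; infer_instance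

-- ===== CLAIM (what is proved, stated in full; the proofs are below) =====
def Claim_equal_divide_almost_equally : Prop := ∀ (arr : List (List (String × Int))) (num_chunks : Int), Dom_divide_almost_equally arr num_chunks → Pre_divide_almost_equally arr num_chunks → Spec_divide_almost_equally arr num_chunks (divide_almost_equally arr num_chunks)

-- ===== LEMMAS AND PROOFS =====

-- the multiset the heap holds, as a function of B's sums table: (sums[t], k+t)
def pvPairs (k : Int) : List Int → List (Int × Int)
  | [] => []
  | v :: vs => (v, k) :: pvPairs (k + 1) vs

theorem pvPairs_length (k : Int) (l : List Int) : (pvPairs k l).length = l.length := by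
  induction l generalizing k with
  | nil => rfl
  | cons v vs ih => simp [pvPairs, ih]

theorem pvPairs_getElem (k : Int) (l : List Int) (t : Nat) (h : t < l.length) :
    (pvPairs k l)[t]'(by simpa [pvPairs_length]) = (l[t], k + (t : Int)) := by
  induction l generalizing k t with
  | nil => simp at h
  | cons v vs ih =>
    cases t with
    | zero => simp [pvPairs]
    | succ t =>
      simp only [pvPairs, List.getElem_cons_succ]
      rw [ih]
      · push_cast; ring_nf
      · simpa using h

theorem pvPairs_set (k : Int) (l : List Int) (t : Nat) (w : Int) :
    pvPairs k (l.set t w) = (pvPairs k l).set t (w, k + (t : Int)) := by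
  induction l generalizing k t with
  | nil => simp [pvPairs]
  | cons v vs ih =>
    cases t with
    | zero => simp [pvPairs]
    | succ t =>
      simp only [List.set_cons_succ, pvPairs, ih]
      push_cast; ring_nf

theorem pvPairLe_antisymm (a b : Int × Int) (h1 : pvPairLe a b = true) (h2 : pvPairLe b a = true) : a = b := by
  simp [pvPairLe] at h1 h2
  rcases a with ⟨a1, a2⟩; rcases b with ⟨b1, b2⟩
  simp_all
  omega

theorem pvPopMin_eq_none_iff (l : List (Int × Int)) : pvPopMin l = none ↔ l = [] := by
  cases l with
  | nil => simp [pvPopMin]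
  | cons x xs =>
    simp only [pvPopMin]
    cases h : pvPopMin xs with
    | none => simp
    | some r => cases r; simp only []; split <;> simp

theorem pvPopMin_spec (l : List (Int × Int)) (m : Int × Int) (r : List (Int × Int))
    (h : pvPopMin l = some (m, r)) :
    (m :: r).Perm l ∧ ∀ y ∈ l, pvPairLe m y = true := by
  induction l generalizing m r with
  | nil => simp [pvPopMin] at h
  | cons x xs ih =>
    simp only [pvPopMin] at h
    cases hx : pvPopMin xs with
    | none =>
      have hnil : xs = [] := (pvPopMin_eq_none_iff xs).mp hx
      rw [hx] at h
      simp only [Option.some.injEq, Prod.mk.injEq] at h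
      obtain ⟨rfl, rfl⟩ := h
      subst hnil
      constructor
      · exact List.Perm.refl _
      · intro y hy; simp at hy; subst hy
        simp [pvPairLe]
    | some r' =>
      obtain ⟨m', rest⟩ := r'
      rw [hx] at h
      dsimp only at h
      obtain ⟨hperm', hmin'⟩ := ih m' rest hx
      by_cases hle : pvPairLe x m' = true
      · rw [if_pos hle] at h
        simp only [Option.some.injEq, Prod.mk.injEq] at h
        obtain ⟨rfl, rfl⟩ := h
        refine ⟨List.Perm.refl _, ?_⟩
        intro y hy
        rcases List.mem_cons.mp hy with rfl | hy
        · simp [pvPairLe]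
        · -- pvPairLe m y from pvPairLe m m' and pvPairLe m' y : transitivity
          have h2 := hmin' y hy
          simp [pvPairLe] at hle h2 ⊢
          rcases hle with h | ⟨h, h'⟩ <;> rcases h2 with g | ⟨g, g'⟩ <;>
            first
            | (left; omega)
            | (right; omega)
      · rw [if_neg hle] at h
        simp only [Option.some.injEq, Prod.mk.injEq] at h
        obtain ⟨rfl, rfl⟩ := h
        constructor
        · exact (List.Perm.swap _ _ _).trans (hperm'.cons x)
        · intro y hy
          rcases List.mem_cons.mp hy with rfl | hy
          · -- pvPairLe m x : since ¬ pvPairLe x m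
            simp [pvPairLe] at hle ⊢
            omega
          · exact hmin' y hy

-- min? = foldl; its result is the FIRST minimum: ≤ everything, < everything strictly before it
theorem pvMinFold_spec {α : Type} (key : α → Int) (xs : List α) (m0 m : α)
    (h : xs.foldl (fun acc x => match acc with
          | none => some x
          | some mm => if key x < key mm then some x else some mm) (some m0) = some m) :
    key m ≤ key m0 ∧ (∀ y ∈ xs, key m ≤ key y) ∧
      (m = m0 ∨ ∃ pre suf, xs = pre ++ m :: suf ∧ key m < key m0 ∧ ∀ y ∈ pre, key m < key y) := by
  induction xs generalizing m0 with
  | nil => simp at h; subst h; exact ⟨le_refl _, by simp, Or.inl rfl⟩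
  | cons x rest ih =>
    simp only [List.foldl_cons] at h
    by_cases hx : key x < key m0
    · rw [if_pos hx] at h
      obtain ⟨h1, h2, h3⟩ := ih x h
      refine ⟨le_trans h1 (le_of_lt hx), ?_, ?_⟩
      · intro y hy
        rcases List.mem_cons.mp hy with rfl | hy
        · exact h1
        · exact h2 y hy
      · rcases h3 with rfl | ⟨pre, suf, heq, hlt, hpre⟩
        · exact Or.inr ⟨[], rest, rfl, hx, by simp⟩
        · refine Or.inr ⟨x :: pre, suf, by rw [heq]; rfl, lt_trans hlt hx, ?_⟩
          intro y hy
          rcases List.mem_cons.mp hy with rfl | hy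
          · exact hlt
          · exact hpre y hy
    · rw [if_neg hx] at h
      obtain ⟨h1, h2, h3⟩ := ih m0 h
      push Not at hx
      refine ⟨h1, ?_, ?_⟩
      · intro y hy
        rcases List.mem_cons.mp hy with rfl | hy
        · exact le_trans h1 hx
        · exact h2 y hy
      · rcases h3 with rfl | ⟨pre, suf, heq, hlt, hpre⟩
        · exact Or.inl rfl
        · refine Or.inr ⟨x :: pre, suf, by rw [heq]; rfl, hlt, ?_⟩
          intro y hy
          rcases List.mem_cons.mp hy with rfl | hy
          · exact lt_of_lt_of_le hlt hx
          · exact hpre y hy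

-- min? of a nonempty list is its FIRST minimum: ≤ everything, < everything strictly before it
theorem pvMin?_first_spec {α : Type} (key : α → Int) (x0 : α) (xr : List α) (m : α)
    (h : PySem.List.min? (x0 :: xr) key = some m) :
    (m = x0 ∧ ∀ y ∈ xr, key m ≤ key y) ∨
    (∃ pre suf, xr = pre ++ m :: suf ∧ key m < key x0 ∧ (∀ y ∈ pre, key m < key y) ∧
      ∀ y ∈ xr, key m ≤ key y) := by
  have h' : xr.foldl (fun acc x => match acc with
      | none => some x
      | some mm => if key x < key mm then some x else some mm) (some x0) = some m := h
  obtain ⟨h1, h2, h3⟩ := pvMinFold_spec key xr x0 m h'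
  rcases h3 with rfl | ⟨pre, suf, heq, hlt, hpre⟩
  · exact Or.inl ⟨rfl, h2⟩
  · exact Or.inr ⟨pre, suf, heq, hlt, hpre, h2⟩

-- the index list [0, …, n-1] as integers
def pvIdx (n : Nat) : List Int := List.map (fun t : Nat => (t : Int)) (List.range n)

theorem pvIdx_length (n : Nat) : (pvIdx n).length = n := by simp [pvIdx]

theorem pvIdx_getElem (n t : Nat) (h : t < n) : (pvIdx n)[t]'(by simpa [pvIdx]) = (t : Int) := by
  simp only [pvIdx]
  rw [List.getElem_map, List.getElem_range]

-- B's argmin over the index range returns the first index of the minimal sum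
theorem pvMin_first (sums : List Int) (hne : sums ≠ []) :
    ∃ j : Nat, ∃ hj : j < sums.length,
      PySem.List.min? (pvIdx sums.length) (fun k => PySem.List.pyGetD sums k 0) = some ((j : Nat) : Int) ∧
      ∀ t, (ht : t < sums.length) →
        pvPairLe (sums[j], ((j : Nat) : Int)) (sums[t]'ht, ((t : Nat) : Int)) = true := by
  have hkn : ∀ (t : Nat) (ht : t < sums.length),
      PySem.List.pyGetD sums ((t : Nat) : Int) 0 = sums[t] := fun t ht => PySem.List.pyGetD_ofNat sums t 0 ht
  have hn : 0 < sums.length := List.length_pos_of_ne_nil hne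
  obtain ⟨k, hk⟩ : ∃ k, sums.length = k + 1 := ⟨sums.length - 1, by omega⟩
  have hxs : pvIdx sums.length
      = ((0 : Nat) : Int) :: List.map (fun t : Nat => (((t + 1 : Nat) : Nat) : Int)) (List.range k) := by
    rw [hk, pvIdx, List.range_succ_eq_map, List.map_cons, List.map_map]
    rfl
  set xr : List Int := List.map (fun t : Nat => (((t + 1 : Nat) : Nat) : Int)) (List.range k) with hxr
  have hxrget : ∀ (i : Nat), (hi : i < k) → xr[i]'(by simpa [hxr]) = ((i + 1 : Nat) : Int) := by
    intro i hi
    simp only [hxr]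
    rw [List.getElem_map, List.getElem_range]
  cases hmin : PySem.List.min? (pvIdx sums.length) (fun k => PySem.List.pyGetD sums k 0) with
  | none =>
      exfalso
      rw [PySem.List.min?_eq_none_iff] at hmin
      rw [hmin] at hxs
      exact List.cons_ne_nil _ _ hxs.symm
  | some m =>
      rw [hxs] at hmin
      rcases pvMin?_first_spec _ _ _ _ hmin with ⟨rfl, hall⟩ | ⟨pre, suf, heq, hlt0, hpre, hall⟩
      · -- first index 0 is a minimum
        refine ⟨0, hn, rfl, ?_⟩
        intro t ht
        cases t with
        | zero => simp [pvPairLe]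
        | succ t' =>
          have ht' : t' < k := by omega
          have hmem : (((t' + 1 : Nat) : Nat) : Int) ∈ xr := by
            have := hxrget t' ht'
            exact this ▸ List.getElem_mem _
          have h2 := hall _ hmem
          rw [hkn 0 hn, hkn (t' + 1) ht] at h2
          simp only [pvPairLe]
          by_cases hcc : sums[0] = sums[t' + 1] <;> simp [hcc] <;> omega
      · -- first strict improvement at index pre.length + 1
        have hxrlen : xr.length = k := by simp [hxr]
        have hklen : k = pre.length + 1 + suf.length := by
          have := congrArg List.length heq
          simp at this
          omega
        refine ⟨pre.length + 1, by omega, ?_, ?_⟩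
        · -- m = ↑(pre.length + 1)
          have hm : m = (((pre.length + 1 : Nat) : Nat) : Int) := by
            have h1 : xr[pre.length]'(by omega) = m := by
              rw [List.getElem_of_eq heq, List.getElem_append_right (Nat.le_refl pre.length)]
              simp
            rw [hxrget pre.length (by omega)] at h1
            exact h1.symm
          rw [← hm]
        · intro t ht
          have hm : m = (((pre.length + 1 : Nat) : Nat) : Int) := by
            have h1 : xr[pre.length]'(by omega) = m := by
              rw [List.getElem_of_eq heq, List.getElem_append_right (Nat.le_refl pre.length)]
              simp
            rw [hxrget pre.length (by omega)] at h1
            exact h1.symm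
          have hj : pre.length + 1 < sums.length := by omega
          have hkeym : PySem.List.pyGetD sums m 0 = sums[pre.length + 1] := by
            rw [hm]; exact hkn _ hj
          cases t with
          | zero =>
            -- strictly better than index 0
            rw [hkeym, hkn 0 hn] at hlt0
            simp only [pvPairLe]
            simp [hlt0]
          | succ t' =>
            have ht' : t' < k := by omega
            by_cases hcase : t' < pre.length
            · -- strictly better than every earlier index
              have hmem : (((t' + 1 : Nat) : Nat) : Int) ∈ pre := by
                have h1 : xr[t']'(by omega) = pre[t']'hcase := by
                  rw [List.getElem_of_eq heq]
                  exact List.getElem_append_left (by omega)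
                rw [hxrget t' ht'] at h1
                exact h1 ▸ List.getElem_mem _
              have h2 := hpre _ hmem
              rw [hkeym, hkn (t' + 1) ht] at h2
              simp only [pvPairLe]
              simp [h2]
            · -- ≤ every later index, with smaller position on ties
              have hmem : (((t' + 1 : Nat) : Nat) : Int) ∈ xr := by
                have := hxrget t' ht'
                exact this ▸ List.getElem_mem _
              have h2 := hall _ hmem
              rw [hkeym, hkn (t' + 1) ht] at h2
              simp only [pvPairLe]
              by_cases hcc : sums[pre.length + 1] = sums[t' + 1] <;> simp [hcc] <;> omega

-- a sets-dict with keys 0..n-1 holding exactly the chunks list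
theorem pvValues_eq (sets : PySem.Dict Int (List (List (String × Int))))
    (chunks : List (List (List (String × Int))))
    (hkeys : sets.keys = pvIdx chunks.length)
    (hget : ∀ t (h : t < chunks.length), sets.getD ((t : Nat) : Int) [] = chunks[t]) :
    sets.values = chunks := by
  have hnd : sets.keys.Nodup := by
    rw [hkeys, pvIdx]
    exact (List.nodup_range).map (fun a b h => by omega)
  rw [PySem.Dict.values_eq_map_keys sets hnd [], hkeys, pvIdx, List.map_map]
  apply List.ext_getElem
  · simp
  · intro t h1 h2
    rw [List.getElem_map, List.getElem_range]
    exact hget t h2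

-- main loop equivalence
theorem pvLoop_eq (its : List (List (String × Int))) (num_chunks : Int) :
    ∀ (sums : List Int) (heap : List (Int × Int))
      (sets : PySem.Dict Int (List (List (String × Int)))) (chunks : List (List (List (String × Int)))),
    PySem.List.pyRange 0 num_chunks 1 = pvIdx sums.length →
    heap.Perm (pvPairs 0 sums) →
    chunks.length = sums.length →
    sets.keys = pvIdx sums.length →
    (∀ t (h : t < chunks.length), sets.getD ((t : Nat) : Int) [] = chunks[t]) →
    (pvLoopA its heap sets).values = pvLoopB num_chunks its sums chunks := by
  induction its with
  | nil =>
    intro sums heap sets chunks hrange hperm hlen hkeys hget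
    simp only [pvLoopA, pvLoopB]
    exact pvValues_eq sets chunks (by rw [hkeys, hlen]) hget
  | cons x rest ih =>
    intro sums heap sets chunks hrange hperm hlen hkeys hget
    by_cases hs : sums = []
    · -- no chunks at all: both loops bail out immediately
      subst hs
      have hheap : heap = [] := by simpa [pvPairs] using hperm
      have hchunks : chunks = [] := List.length_eq_zero_iff.mp (by simpa using hlen)
      subst hheap
      have hmin : PySem.List.min? (PySem.List.pyRange 0 num_chunks 1)
          (fun k => PySem.List.pyGetD ([] : List Int) k 0) = none := by
        rw [hrange]; rfl
      simp only [pvLoopA, pvLoopB, pvPopMin, hmin]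
      exact pvValues_eq sets chunks (by rw [hkeys, hchunks]; rfl) hget
    · obtain ⟨j, hj, hminEq, hjmin⟩ := pvMin_first sums hs
      -- A pops some element (s, i) from the heap
      have hheapne : heap ≠ [] := by
        intro hc
        rw [hc] at hperm
        have h0 := hperm.length_eq
        rw [pvPairs_length] at h0
        have hpos : 0 < sums.length := List.length_pos_of_ne_nil hs
        simp at h0
        omega
      obtain ⟨⟨si, ii⟩, heap', hpop⟩ : ∃ m heap', pvPopMin heap = some (m, heap') := by
        cases hpp : pvPopMin heap with
        | none => exact absurd ((pvPopMin_eq_none_iff heap).mp hpp) hheapne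
        | some r => obtain ⟨mm, hh⟩ := r; exact ⟨mm, hh, rfl⟩
      obtain ⟨hpopPerm, hpopMin⟩ := pvPopMin_spec heap (si, ii) heap' hpop
      -- the popped element is exactly (sums[j], j)
      have hpairlen : (pvPairs 0 sums).length = sums.length := pvPairs_length 0 sums
      have hPj : (pvPairs 0 sums)[j]'(by omega) = (sums[j], ((j : Nat) : Int)) := by
        rw [pvPairs_getElem 0 sums j hj]; simp
      have hmemP : (sums[j], ((j : Nat) : Int)) ∈ pvPairs 0 sums := hPj ▸ List.getElem_mem _
      have hmemheap : (sums[j], ((j : Nat) : Int)) ∈ heap := hperm.mem_iff.mpr hmemP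
      have hle1 : pvPairLe (si, ii) (sums[j], ((j : Nat) : Int)) = true := hpopMin _ hmemheap
      have hmemsi : (si, ii) ∈ pvPairs 0 sums :=
        (hpopPerm.trans hperm).subset (List.mem_cons_self ..)
      obtain ⟨t, ht, hsit⟩ : ∃ t, ∃ ht : t < sums.length, (si, ii) = (sums[t]'ht, ((t : Nat) : Int)) := by
        obtain ⟨t, ht, hEq⟩ := List.mem_iff_getElem.mp hmemsi
        refine ⟨t, by omega, ?_⟩
        rw [← hEq, pvPairs_getElem 0 sums t (by omega)]
        simp
      have hle2 : pvPairLe (sums[j], ((j : Nat) : Int)) (si, ii) = true := by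
        rw [hsit]; exact hjmin t ht
      have hsi : (si, ii) = (sums[j], ((j : Nat) : Int)) := pvPairLe_antisymm _ _ hle1 hle2
      have hsi1 : si = sums[j] := congrArg Prod.fst hsi
      have hsi2 : ii = ((j : Nat) : Int) := congrArg Prod.snd hsi
      -- unfold one step of both loops
      have hgetj : PySem.List.pyGetD sums ((j : Nat) : Int) 0 = sums[j] :=
        PySem.List.pyGetD_ofNat sums j 0 hj
      have hgetcj : PySem.List.pyGetD chunks ((j : Nat) : Int) [] = chunks[j]'(by omega) :=
        PySem.List.pyGetD_ofNat chunks j [] (by omega)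
      simp only [pvLoopA, pvLoopB, hpop, hrange, hminEq, hgetj, hgetcj, Int.toNat_natCast, hsi1, hsi2]
      -- invariants for the next iteration
      set d : Int := pvDur x with hd
      set sums' : List Int := sums.set j (sums[j] + d) with hsums'
      have hlen' : sums'.length = sums.length := by simp [hsums']
      apply ih sums'
      · rw [hrange, hlen']
      · -- heap invariant
        rw [hsums', pvPairs_set]
        simp only [zero_add]
        have e1 : (pvPairs 0 sums).set j (sums[j] + d, ((j : Nat) : Int))
            = (pvPairs 0 sums).take j ++ (sums[j] + d, ((j : Nat) : Int)) :: (pvPairs 0 sums).drop (j + 1) :=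
          List.set_eq_take_cons_drop _ (by omega)
        have e2 : (pvPairs 0 sums) = (pvPairs 0 sums).take j ++ (sums[j], ((j : Nat) : Int)) :: (pvPairs 0 sums).drop (j + 1) := by
          conv_lhs => rw [← List.take_append_drop j (pvPairs 0 sums)]
          rw [← List.getElem_cons_drop (by omega : j < (pvPairs 0 sums).length), hPj]
        have hpop2 : ((sums[j], ((j : Nat) : Int)) :: heap').Perm (pvPairs 0 sums) := by
          have hh := hpopPerm.trans hperm
          rwa [hsi1, hsi2] at hh
        have p2 : (pvPairs 0 sums).Perm
            ((sums[j], ((j : Nat) : Int)) :: ((pvPairs 0 sums).take j ++ (pvPairs 0 sums).drop (j + 1))) := by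
          conv_lhs => rw [e2]
          exact List.perm_middle
        have hheap' : heap'.Perm ((pvPairs 0 sums).take j ++ (pvPairs 0 sums).drop (j + 1)) :=
          (hpop2.trans p2).cons_inv
        rw [e1]
        refine (List.perm_append_singleton _ _).trans ?_
        refine ((hheap'.cons _).trans ?_)
        exact List.perm_middle.symm
      · simp [hlen', hlen]
      · rw [PySem.Dict.keys_modify, PySem.Dict.keys_insert_of_contains, hkeys, hlen']
        rw [PySem.Dict.contains_iff_mem_keys, hkeys, pvIdx]
        exact List.mem_map.mpr ⟨j, List.mem_range.mpr (by omega), rfl⟩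
      · intro t h
        have htlen : t < chunks.length := by simpa [hlen', hlen] using h
        rw [PySem.Dict.getD_modify, List.getElem_set]
        by_cases hcase : t = j
        · subst hcase
          rw [if_pos rfl, if_pos rfl, hget t htlen]
        · have h1 : ¬(((t : Nat) : Int) = ((j : Nat) : Int)) := by
            intro hc; exact hcase (by exact_mod_cast hc)
          rw [if_neg h1, if_neg (fun hc => hcase hc.symm), hget t htlen]

theorem divide_almost_equally_spec : Claim_equal_divide_almost_equally := by
  intro arr num_chunks hdom hpre
  unfold Spec_divide_almost_equally divide_almost_equally divide_almost_equally_alt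
  dsimp only
  set l : List Int := PySem.List.pyRange 0 num_chunks 1 with hl
  set n : Nat := num_chunks.toNat with hn
  have hA : l = pvIdx n := by
    rw [hl, PySem.List.pyRange_one, pvIdx]
    simp only [Int.sub_zero]
    exact List.map_congr_left (fun a _ => by simp)
  set sums : List Int := l.map (fun _ => (0 : Int)) with hsums
  set chunks : List (List (List (String × Int))) := l.map (fun _ => ([] : List (List (String × Int)))) with hchunks
  set sets : PySem.Dict Int (List (List (String × Int))) :=
    l.foldl (fun d i => d.insert i ([] : List (List (String × Int)))) PySem.Dict.empty with hsets
  have hslen : sums.length = n := by rw [hsums, List.length_map, hA, pvIdx_length]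
  have hclen : chunks.length = n := by rw [hchunks, List.length_map, hA, pvIdx_length]
  have hitems : sets.items = List.map (fun a => (a, ([] : List (List (String × Int))))) l := by
    have h1 : ∀ a ∈ l, (PySem.Dict.empty : PySem.Dict Int (List (List (String × Int)))).contains a = false := by
      intro a _; simp
    have h2 : (l.map (fun i => i)).Nodup := by
      simpa using PySem.List.nodup_pyRange_one 0 num_chunks
    have h3 := PySem.Dict.items_foldl_insert_fresh l (fun i => i)
      (fun _ => ([] : List (List (String × Int)))) PySem.Dict.empty h1 h2
    simp only [] at h3
    rw [hsets, h3]
    simp [PySem.Dict.empty]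
  have hkeys0 : sets.keys = l := by
    simp only [PySem.Dict.keys, hitems, List.map_map]
    exact (List.map_congr_left (fun a _ => rfl)).trans (List.map_id _)
  have hnd : sets.keys.Nodup := by
    rw [hkeys0]; exact PySem.List.nodup_pyRange_one 0 num_chunks
  have hget0 : ∀ t, (h : t < chunks.length) → sets.getD ((t : Nat) : Int) [] = chunks[t] := by
    intro t h
    have htn : t < n := by omega
    have hmem : (((t : Nat) : Int), ([] : List (List (String × Int)))) ∈ sets.items := by
      rw [hitems]
      exact List.mem_map.mpr ⟨((t : Nat) : Int),
        by rw [hA, pvIdx]; exact List.mem_map.mpr ⟨t, List.mem_range.mpr htn, rfl⟩, rfl⟩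
    rw [PySem.Dict.getD_of_mem_items sets hmem hnd]
    rw [List.getElem_of_eq hchunks, List.getElem_map]
  have hheapEq : l.map (fun idx => ((0 : Int), idx)) = pvPairs 0 sums := by
    apply List.ext_getElem
    · rw [List.length_map, pvPairs_length, hsums, List.length_map]
    · intro t h1 h2
      have htn : t < n := by rw [List.length_map, hA, pvIdx_length] at h1; omega
      rw [List.getElem_map, pvPairs_getElem 0 sums t (by omega)]
      have hlt : l[t]'(by rw [hA, pvIdx_length]; omega) = ((t : Nat) : Int) := by
        rw [List.getElem_of_eq hA, pvIdx_getElem n t htn]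
      have hst : sums[t]'(by omega) = (0 : Int) := by
        rw [List.getElem_of_eq hsums, List.getElem_map]
      rw [hlt, hst, zero_add]
  exact pvLoop_eq _ num_chunks sums _ sets chunks
    (by rw [hslen, ← hA, hl]) (hheapEq ▸ List.Perm.refl _) (by omega)
    (by rw [hkeys0, hslen, hA]) hget0
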